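-- pv_equiv track=rewrite | github.com/pypi-data/pypi-mirror-99 | packages/vsg/vsg-3.0.0.tar.gz/vsg-3.0.0/vsg/tokens.py | combine_character_literals
-- ===== SOURCE A (Python) =====
-- def combine_character_literals(lChars):
--     lReturn = []
--     sLiteral = ''
--     bLiteral = False
--     for iChar, sChar in enumerate(lChars):
--         try:
--             if sChar == "'" and lChars[iChar + 2] == "'" and len(lChars[iChar + 1]) == 1 and not bLiteral:
--                 sLiteral += sChar
--                 bLiteral = True
--                 continue
--         except IndexError:
--             pass
--         if not bLiteral:
--             lReturn.append(sChar)
--         else: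
--             sLiteral += sChar
--         if sChar == "'" and bLiteral:
--             bLiteral = False
--             lReturn.append(sLiteral)
--             sLiteral = ''
--
--     return lReturn
-- ===== SOURCE B (Python) =====
-- def combine_character_literals(lChars):
--     lReturn = []
--     n = len(lChars)
--     i = 0
--     while i < n:
--         if lChars[i] == "'" and i + 2 < n and lChars[i + 2] == "'" and len(lChars[i + 1]) == 1:
--             j = i + 1
--             while lChars[j] != "'":
--                 j += 1
--             lReturn.append("".join(lChars[i:j + 1]))
--             i = j + 1
--         else:
--             lReturn.append(lChars[i])
--             i += 1
--     return lReturn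
-- ===== Notes on version B (the rewrite author's own statement) =====
-- stated objective: simpler
-- what changed: Replaced A's literal-mode flag and string accumulator threaded through a flat enumerate loop by an index-cursor scanner that, on seeing the quote pattern, scans forward to the first closing quote, emits the joined literal in one step and jumps the cursor past it.
import Mathlib
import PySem

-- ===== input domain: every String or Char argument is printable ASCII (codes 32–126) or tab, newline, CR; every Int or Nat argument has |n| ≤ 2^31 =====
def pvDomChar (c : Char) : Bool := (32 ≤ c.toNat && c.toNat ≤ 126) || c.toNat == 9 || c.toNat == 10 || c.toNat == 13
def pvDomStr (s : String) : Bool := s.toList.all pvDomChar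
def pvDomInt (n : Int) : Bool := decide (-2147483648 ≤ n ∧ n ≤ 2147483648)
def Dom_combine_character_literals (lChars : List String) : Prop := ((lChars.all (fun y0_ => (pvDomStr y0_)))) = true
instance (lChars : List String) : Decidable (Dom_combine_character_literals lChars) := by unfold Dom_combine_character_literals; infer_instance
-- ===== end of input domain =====

-- B replaces A's flag-and-accumulator single pass by an index-cursor scanner with a nested
-- close-scan that emits each combined literal in one step (objective: simpler decomposition, same cost).

-- ===== PORT A =====
-- one iteration of A's for-loop body; state = (lReturn, sLiteral, bLiteral)
def pvAStep (lChars : List String) (st : List String × String × Bool) (p : Int × String) : List String × String × Bool :=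
  let lReturn := st.1
  let sLiteral := st.2.1
  let bLiteral := st.2.2
  let iChar := p.1
  let sChar := p.2
  -- the try-block: pyGet? = none is exactly Python's IndexError, which A catches and ignores
  if sChar = "'" ∧ PySem.List.pyGet? lChars (iChar + 2) = some "'" ∧
     (PySem.List.pyGet? lChars (iChar + 1)).map PySem.Str.len = some 1 ∧ bLiteral = false then
    (lReturn, sLiteral ++ sChar, true)       -- start a literal; 'continue'
  else
    let lReturn' := if bLiteral = false then lReturn ++ [sChar] else lReturn
    let sLiteral' := if bLiteral = false then sLiteral else sLiteral ++ sChar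
    if sChar = "'" ∧ bLiteral = true then
      (lReturn' ++ [sLiteral'], "", false)   -- close the literal
    else
      (lReturn', sLiteral', bLiteral)

def combine_character_literals (lChars : List String) : List String :=
  ((PySem.List.enumerate lChars 0).foldl (pvAStep lChars) ([], "", false)).1

-- ===== PORT B =====
-- the inner while-loop of Source B: first index ≥ j whose token is "'"
-- (the final else makes the recursion total; under the caller's guard a quote is always found)
def pvBClose (lChars : List String) (j : Nat) : Nat :=
  if h : j < lChars.length then
    if lChars[j] = "'" then j else pvBClose lChars (j + 1)
  else j
termination_by lChars.length - j

theorem pvBClose_ge (lChars : List String) (j : Nat) : j ≤ pvBClose lChars j := by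
  fun_induction pvBClose lChars j with
  | case1 => omega
  | case2 _ _ _ ih => omega
  | case3 => omega

-- the outer while-loop of Source B: cursor i, one output token (or combined literal) per step
def pvBScan (lChars : List String) (i : Nat) : List String :=
  if h : i < lChars.length then
    if lChars[i] = "'" ∧ i + 2 < lChars.length ∧
       lChars[i+2]?.getD "" = "'" ∧ PySem.Str.len (lChars[i+1]?.getD "") = 1 then
      let j := pvBClose lChars (i + 1)
      PySem.Str.join "" (PySem.List.slice lChars (some (i : Int)) (some ((j : Int) + 1)))
        :: pvBScan lChars (j + 1)
    else
      lChars[i] :: pvBScan lChars (i + 1)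
  else []
termination_by lChars.length - i
decreasing_by
  · have := pvBClose_ge lChars (i + 1); omega
  · omega

def combine_character_literals_alt (lChars : List String) : List String :=
  pvBScan lChars 0

-- ===== PRECONDITION & SPEC =====
def Spec_combine_character_literals (lChars : List String) (out : List String) : Prop := out = combine_character_literals_alt lChars
instance (lChars : List String) (out : List String) : Decidable (Spec_combine_character_literals lChars out) := by unfold Spec_combine_character_literals; infer_instance

-- ===== CLAIM =====
def Claim_equal_combine_character_literals : Prop := ∀ (lChars : List String), Dom_combine_character_literals lChars → Spec_combine_character_literals lChars (combine_character_literals lChars)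

-- ===== LEMMAS AND PROOFS =====

-- when a quote stands at j+1 (i.e. within two tokens), the close-scan stops at j or j+1
theorem pvBClose_near (lChars : List String) (j : Nat) (hb : j + 1 < lChars.length)
    (hq : lChars[j+1] = "'") :
    pvBClose lChars j = if lChars[j] = "'" then j else j + 1 := by
  rw [pvBClose, dif_pos (by omega)]
  by_cases h0 : lChars[j] = "'"
  · simp [h0]
  · rw [if_neg h0, if_neg h0, pvBClose, dif_pos hb, if_pos hq]

-- the joined slice for a two-token literal
theorem pvJoin_two (lChars : List String) (i : Nat) (hb : i + 1 < lChars.length) :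
    PySem.Str.join "" (PySem.List.slice lChars (some (i : Int)) (some (((i + 1 : Nat) : Int) + 1)))
      = lChars[i] ++ lChars[i+1] := by
  have hcast : ((i + 1 : Nat) : Int) + 1 = ((i + 2 : Nat) : Int) := by push_cast; ring
  rw [hcast, PySem.List.slice_natCast]
  have hd : (lChars.drop i).take (i + 2 - i) = [lChars[i], lChars[i+1]] := by
    have h2 : i + 2 - i = 2 := by omega
    rw [h2, List.drop_eq_getElem_cons (by omega : i < lChars.length),
        List.drop_eq_getElem_cons hb, List.take_succ_cons, List.take_succ_cons, List.take_zero]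
  rw [hd]
  apply String.toList_inj.mp
  simp [PySem.Str.toList_join, PySem.Chars.join_cons_cons, PySem.Chars.join_singleton]

-- the joined slice for a three-token literal
theorem pvJoin_three (lChars : List String) (i : Nat) (hb : i + 2 < lChars.length) :
    PySem.Str.join "" (PySem.List.slice lChars (some (i : Int)) (some (((i + 2 : Nat) : Int) + 1)))
      = lChars[i] ++ lChars[i+1] ++ lChars[i+2] := by
  have hcast : ((i + 2 : Nat) : Int) + 1 = ((i + 3 : Nat) : Int) := by push_cast; ring
  rw [hcast, PySem.List.slice_natCast]
  have hd : (lChars.drop i).take (i + 3 - i) = [lChars[i], lChars[i+1], lChars[i+2]] := by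
    have h3 : i + 3 - i = 3 := by omega
    rw [h3, List.drop_eq_getElem_cons (by omega : i < lChars.length),
        List.drop_eq_getElem_cons (by omega : i + 1 < lChars.length), List.drop_eq_getElem_cons hb,
        List.take_succ_cons, List.take_succ_cons, List.take_succ_cons, List.take_zero]
  rw [hd]
  apply String.toList_inj.mp
  simp [PySem.Str.toList_join, PySem.Chars.join_cons_cons, PySem.Chars.join_singleton]

-- main invariant: folding A's loop body over the suffix of the enumeration starting at i,
-- out of literal mode, appends exactly what B's scanner emits from cursor i
theorem pvA_suffix_eq_B (lChars : List String) (i : Nat) (acc : List String) :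
    (PySem.List.enumerate (lChars.drop i) (i : Int)).foldl (pvAStep lChars) (acc, "", false)
      = (acc ++ pvBScan lChars i, "", false) := by
  by_cases h : i < lChars.length
  · have hdrop : lChars.drop i = lChars[i] :: lChars.drop (i+1) := List.drop_eq_getElem_cons h
    by_cases C : lChars[i] = "'" ∧ lChars[i+2]? = some "'" ∧ lChars[i+1]?.map PySem.Str.len = some (1:Int)
    · obtain ⟨C1, C2, C3⟩ := C
      have hb2 : i + 2 < lChars.length := (List.getElem?_eq_some_iff.mp C2).1
      have hv2 : lChars[i+2] = "'" := (List.getElem?_eq_some_iff.mp C2).2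
      have hb1 : i + 1 < lChars.length := by omega
      have hg1 : lChars[i+1]? = some lChars[i+1] := List.getElem?_eq_getElem hb1
      have hg2 : lChars[i+2]? = some lChars[i+2] := List.getElem?_eq_getElem hb2
      have hl1 : PySem.Str.len lChars[i+1] = 1 := by
        rw [hg1] at C3; simpa using C3
      have hdrop1 : lChars.drop (i+1) = lChars[i+1] :: lChars.drop (i+2) := List.drop_eq_getElem_cons hb1
      have hpg2 : PySem.List.pyGet? lChars ((i:Int) + 2) = some "'" := by
        have : ((i:Int) + 2) = ((i+2 : Nat) : Int) := by push_cast; ring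
        rw [this, PySem.List.pyGet?_natCast]; exact C2
      have hpg1 : (PySem.List.pyGet? lChars ((i:Int) + 1)).map PySem.Str.len = some 1 := by
        have : ((i:Int) + 1) = ((i+1 : Nat) : Int) := by push_cast; ring
        rw [this, PySem.List.pyGet?_natCast, hg1]; simpa using hl1
      -- step 1: start the literal
      rw [hdrop, PySem.List.enumerate_cons, List.foldl_cons]
      have s1 : pvAStep lChars (acc, "", false) ((i:Int), lChars[i]) = (acc, "" ++ "'", true) := by
        simp only [pvAStep]
        rw [if_pos ⟨C1, hpg2, hpg1, trivial⟩, C1]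
      rw [s1]
      rw [hdrop1, PySem.List.enumerate_cons, List.foldl_cons]
      have hBguard : lChars[i] = "'" ∧ i + 2 < lChars.length ∧
          lChars[i+2]?.getD "" = "'" ∧ PySem.Str.len (lChars[i+1]?.getD "") = 1 :=
        ⟨C1, hb2, by rw [hg2]; simpa using hv2, by rw [hg1]; simpa using hl1⟩
      by_cases hmid : lChars[i+1] = "'"
      · -- step 2 closes the literal immediately (the close-scan stops at i+1)
        have s2 : pvAStep lChars (acc, "" ++ "'", true) ((i:Int) + 1, lChars[i+1])
            = (acc ++ ["''"], "", false) := by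
          simp only [pvAStep, hmid]
          rw [if_neg (by simp)]
          simp
        rw [s2]
        have hcast : (i:Int) + 1 + 1 = ((i + 2 : Nat) : Int) := by push_cast; ring
        have hclose : pvBClose lChars (i+1) = i + 1 := by
          rw [pvBClose_near lChars (i+1) (by omega) hv2, if_pos hmid]
        have hB : pvBScan lChars i = "''" :: pvBScan lChars (i+2) := by
          rw [pvBScan]
          rw [dif_pos h, if_pos hBguard]
          simp only [hclose]
          rw [pvJoin_two lChars i hb1, C1, hmid]
          rfl
        rw [hcast, pvA_suffix_eq_B lChars (i+2) (acc ++ ["''"]), hB]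
        simp
      · -- step 2 accumulates the middle token, step 3 closes (the close-scan stops at i+2)
        have s2 : pvAStep lChars (acc, "" ++ "'", true) ((i:Int) + 1, lChars[i+1])
            = (acc, ("" ++ "'") ++ lChars[i+1], true) := by
          simp only [pvAStep]
          rw [if_neg (by simp), if_neg (by simp [hmid])]
          simp
        rw [s2]
        have hdrop2 : lChars.drop (i+2) = lChars[i+2] :: lChars.drop (i+3) := List.drop_eq_getElem_cons hb2
        rw [hdrop2, PySem.List.enumerate_cons, List.foldl_cons]
        have s3 : pvAStep lChars (acc, ("" ++ "'") ++ lChars[i+1], true) ((i:Int) + 1 + 1, lChars[i+2])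
            = (acc ++ ["'" ++ lChars[i+1] ++ "'"], "", false) := by
          simp only [pvAStep, hv2]
          rw [if_neg (by simp)]
          simp
        rw [s3]
        have hcast : (i:Int) + 1 + 1 + 1 = ((i + 3 : Nat) : Int) := by push_cast; ring
        have hclose : pvBClose lChars (i+1) = i + 2 := by
          rw [pvBClose_near lChars (i+1) (by omega) hv2, if_neg hmid]
        have hB : pvBScan lChars i = ("'" ++ lChars[i+1] ++ "'") :: pvBScan lChars (i+3) := by
          rw [pvBScan]
          rw [dif_pos h, if_pos hBguard]
          simp only [hclose]
          rw [pvJoin_three lChars i hb2, C1, hv2]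
        rw [hcast, pvA_suffix_eq_B lChars (i+3) (acc ++ ["'" ++ lChars[i+1] ++ "'"]), hB]
        simp
    · -- no literal starts at i: both sides emit lChars[i] and move on
      rw [hdrop, PySem.List.enumerate_cons, List.foldl_cons]
      have s1 : pvAStep lChars (acc, "", false) ((i:Int), lChars[i])
          = (acc ++ [lChars[i]], "", false) := by
        simp only [pvAStep]
        rw [if_neg (by
          rintro ⟨h1, h2, h3, -⟩
          apply C
          refine ⟨h1, ?_, ?_⟩
          · have : ((i:Int) + 2) = ((i+2 : Nat) : Int) := by push_cast; ring
            rw [this, PySem.List.pyGet?_natCast] at h2; exact h2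
          · have : ((i:Int) + 1) = ((i+1 : Nat) : Int) := by push_cast; ring
            rw [this, PySem.List.pyGet?_natCast] at h3; exact h3)]
        simp
      rw [s1]
      have hcast : (i:Int) + 1 = ((i + 1 : Nat) : Int) := by push_cast; ring
      have hB : pvBScan lChars i = lChars[i] :: pvBScan lChars (i+1) := by
        rw [pvBScan]
        rw [dif_pos h]
        rw [if_neg (by
          rintro ⟨h1, h2, h3, h4⟩
          apply C
          have hg1 : lChars[i+1]? = some lChars[i+1] := List.getElem?_eq_getElem (by omega)
          have hg2 : lChars[i+2]? = some lChars[i+2] := List.getElem?_eq_getElem h2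
          refine ⟨h1, ?_, ?_⟩
          · rw [hg2]; rw [hg2] at h3; simpa using h3
          · rw [hg1]; rw [hg1] at h4; simpa using h4)]
      rw [hcast, pvA_suffix_eq_B lChars (i+1) (acc ++ [lChars[i]]), hB]
      simp
  · have hdrop : lChars.drop i = [] := List.drop_eq_nil_of_le (by omega)
    rw [hdrop, pvBScan, dif_neg h]
    simp [PySem.List.enumerate]
termination_by lChars.length - i
decreasing_by all_goals omega

-- ===== VERDICT =====
theorem combine_character_literals_spec : Claim_equal_combine_character_literals := by
  intro lChars _
  unfold Spec_combine_character_literals combine_character_literals combine_character_literals_alt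
  have h := pvA_suffix_eq_B lChars 0 []
  simp only [List.drop_zero, Int.natCast_zero] at h
  rw [h]
  simp
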